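-- pv_equiv track=rewrite | github.com/YuSangHuck/algorithm | huck/05주차/brute_force/1436_영화감독_숌.py | isEndNumber
-- ===== SOURCE A (Python) =====
-- def isEndNumber(i):
--   res = False
--   # 1자리씩 검사
--   # 1의자리
--   while i != 0:
--     if i % 1000 == 666:
--       res = True
--       break
--
--     i = i // 10
--   return res
-- ===== SOURCE B (Python) =====
-- def isEndNumber(i):
--   return '666' in str(i)
-- ===== Notes on version B (the rewrite author's own statement) =====
-- stated objective: idiomatic
-- what changed: Replaces A's digit-stripping loop (repeated %1000 test and //10) with a single substring test '666' in str(i).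
-- outside the precondition, e.g. on isEndNumber(-334): A returns True, B returns False
import Mathlib
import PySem

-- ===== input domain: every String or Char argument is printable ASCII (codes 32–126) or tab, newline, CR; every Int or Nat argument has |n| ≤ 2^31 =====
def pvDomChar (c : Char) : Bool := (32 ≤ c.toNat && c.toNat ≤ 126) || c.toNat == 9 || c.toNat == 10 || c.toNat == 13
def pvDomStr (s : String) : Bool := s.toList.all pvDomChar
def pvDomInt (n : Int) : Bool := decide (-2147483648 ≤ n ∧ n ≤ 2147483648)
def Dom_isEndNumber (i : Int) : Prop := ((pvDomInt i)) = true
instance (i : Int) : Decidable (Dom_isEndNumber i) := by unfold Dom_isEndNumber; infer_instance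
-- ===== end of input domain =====

-- B replaces A's digit-stripping loop (%1000 test, //10) by the idiomatic substring test
-- '666' in str(i); equivalence is claimed on non-negative inputs (see Pre_ below).

-- ===== PORT A =====
-- A's 'while i != 0' loop; the fuel i.natAbs + 1 is enough for every non-negative i
-- (each '//10' strictly decreases a positive i), so on Pre_ this is exactly A's loop.
def isEndNumberGo : Nat → Int → Bool
  | 0, _ => false
  | fuel + 1, i =>
    if i = 0 then false
    else if PySem.Int.mod i 1000 = 666 then true
    else isEndNumberGo fuel (PySem.Int.floordiv i 10)

def isEndNumber (i : Int) : Bool := isEndNumberGo (i.natAbs + 1) i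

-- ===== PORT B =====
def isEndNumber_alt (i : Int) : Bool := PySem.Str.isIn "666" (PySem.Int.toStr i)

-- ===== PRECONDITION & SPEC =====
-- Pre_ excludes negative inputs: there A's loop usually never terminates ('i // 10' of a
-- negative number never reaches 0), and on the few negatives where it does return, its True
-- is an accident of Python's negative floor-mod (e.g. -334 % 1000 == 666).
def Pre_isEndNumber (i : Int) : Prop := 0 ≤ i
instance (i : Int) : Decidable (Pre_isEndNumber i) := by unfold Pre_isEndNumber; infer_instance
def pvWitness_isEndNumber : Int := 2666421

def Spec_isEndNumber (i : Int) (out : Bool) : Prop := out = isEndNumber_alt i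
instance (i : Int) (out : Bool) : Decidable (Spec_isEndNumber i out) := by unfold Spec_isEndNumber; infer_instance

-- ===== CLAIM (what is proved, stated in full; the proofs are below) =====
def Claim_equal_isEndNumber : Prop := ∀ (i : Int), Dom_isEndNumber i → Pre_isEndNumber i → Spec_isEndNumber i (isEndNumber i)

-- ===== LEMMAS AND PROOFS =====

-- A's loop on a natural number, with Python arithmetic replaced by Nat arithmetic.
def has666 : Nat → Bool := fun n =>
  if n = 0 then false
  else if n % 1000 = 666 then true
  else has666 (n / 10)
  decreasing_by exact Nat.div_lt_self (Nat.pos_of_ne_zero (by assumption)) (by omega)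

-- Big-endian decimal digits of a natural number, one digit peeled per step.
def digs : Nat → List Char := fun n =>
  if h : n < 10 then [Nat.digitChar n]
  else digs (n / 10) ++ [Nat.digitChar (n % 10)]
  decreasing_by exact Nat.div_lt_self (by omega) (by omega)

theorem digs_small {n : Nat} (h : n < 10) : digs n = [Nat.digitChar n] := by
  rw [digs]; simp [h]

theorem digs_big {n : Nat} (h : 10 ≤ n) :
    digs n = digs (n / 10) ++ [Nat.digitChar (n % 10)] := by
  rw [digs]; simp [Nat.not_lt.mpr h]

theorem length_digs_small {n : Nat} (h : n < 100) : (digs n).length ≤ 2 := by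
  by_cases h1 : n < 10
  · simp [digs_small h1]
  · rw [digs_big (Nat.not_lt.mp h1), digs_small (by omega : n / 10 < 10)]
    simp

theorem digitChar_eq_six {d : Nat} (hd : d < 10) : Nat.digitChar d = '6' ↔ d = 6 := by
  interval_cases d <;> simp [Nat.digitChar]

-- Every digs n ends with the last decimal digit of n.
theorem digs_last (n : Nat) : ∃ init, digs n = init ++ [Nat.digitChar (n % 10)] := by
  by_cases h : n < 10
  · exact ⟨[], by rw [digs_small h, Nat.mod_eq_of_lt h]; simp⟩
  · exact ⟨_, digs_big (Nat.not_lt.mp h)⟩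

-- ['6','6','6'] is a suffix of the decimal digits of m exactly when m % 1000 = 666.
theorem suffix_666_iff (m : Nat) : (['6', '6', '6'] <:+ digs m) ↔ m % 1000 = 666 := by
  by_cases h : m < 100
  · constructor
    · intro hs
      have h1 := hs.length_le
      have h2 := length_digs_small h
      simp at h1
      omega
    · intro hm; exact absurd hm (by omega)
  · have h100 : 100 ≤ m := Nat.not_lt.mp h
    have e0 : digs m = digs (m / 100) ++ [Nat.digitChar (m / 10 % 10), Nat.digitChar (m % 10)] := by
      rw [digs_big (by omega : 10 ≤ m), digs_big (by omega : 10 ≤ m / 10),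
        Nat.div_div_eq_div_mul, List.append_assoc]
      norm_num
    obtain ⟨init, einit⟩ := digs_last (m / 100)
    have em : digs m = init ++ [Nat.digitChar (m / 100 % 10), Nat.digitChar (m / 10 % 10),
        Nat.digitChar (m % 10)] := by
      rw [e0, einit]; simp
    constructor
    · intro hs
      obtain ⟨t, ht⟩ := hs
      rw [em] at ht
      have hlen : t.length = init.length := by
        have := congrArg List.length ht
        simp at this; omega
      have heq := (List.append_inj ht hlen).2
      simp only [List.cons.injEq, and_true] at heq
      obtain ⟨e2, e1, e00⟩ := heq
      have d2 := (digitChar_eq_six (Nat.mod_lt _ (by omega))).mp e2.symm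
      have d1 := (digitChar_eq_six (Nat.mod_lt _ (by omega))).mp e1.symm
      have d0 := (digitChar_eq_six (Nat.mod_lt _ (by omega))).mp e00.symm
      omega
    · intro hm
      have d2 : m / 100 % 10 = 6 := by omega
      have d1 : m / 10 % 10 = 6 := by omega
      have d0 : m % 10 = 6 := by omega
      rw [em, d2, d1, d0]
      exact ⟨init, by simp [Nat.digitChar]⟩

-- An infix of l ++ [c] is an infix of l or a suffix of l ++ [c].
theorem infix_append_singleton {α : Type} {l' l : List α} {c : α}
    (h : l' <:+: l ++ [c]) : l' <:+: l ∨ l' <:+ l ++ [c] := by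
  obtain ⟨s, t, hst⟩ := h
  rcases t.eq_nil_or_concat with rfl | ⟨t', d, rfl⟩
  · right; exact ⟨s, by simpa using hst⟩
  · left
    have : (s ++ l' ++ t') ++ [d] = l ++ [c] := by simpa using hst
    have := (List.append_inj' this rfl).1
    exact ⟨s, t', by simpa using this⟩

-- Main characterisation: A's loop finds 666 iff '666' occurs in the decimal digits.
theorem has666_iff_infix (n : Nat) : has666 n = true ↔ ['6', '6', '6'] <:+: digs n := by
  induction n using Nat.strong_induction_on with
  | _ n ih =>
    rw [has666]
    by_cases h0 : n = 0
    · subst h0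
      simp [digs_small (by omega : (0:Nat) < 10)]
      intro hinf
      have := hinf.length_le
      simp at this
    · by_cases h666 : n % 1000 = 666
      · simp [h0, h666]
        exact ((suffix_666_iff n).mpr h666).isInfix
      · simp only [h0, h666, if_false]
        have hrec := ih (n / 10) (Nat.div_lt_self (Nat.pos_of_ne_zero h0) (by omega))
        by_cases hs : n < 10
        · rw [hrec]
          have : n / 10 = 0 := by omega
          rw [this]
          simp [digs_small (by omega : (0:Nat) < 10), digs_small hs]
          constructor
          · intro hinf; have := hinf.length_le; simp at this
          · intro hinf; have := hinf.length_le; simp at this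
        · rw [hrec, digs_big (Nat.not_lt.mp hs)]
          constructor
          · exact fun h => h.trans (List.prefix_append _ _).isInfix
          · intro hinf
            rcases infix_append_singleton hinf with h | h
            · exact h
            · exfalso
              exact h666 ((suffix_666_iff n).mp (by rwa [digs_big (Nat.not_lt.mp hs)]))

-- Fuel bridge: with enough fuel, A's loop on a cast Nat is has666.
theorem isEndNumberGo_eq_has666 (fuel n : Nat) (h : n < fuel) :
    isEndNumberGo fuel (n : Int) = has666 n := by
  induction fuel generalizing n with
  | zero => omega
  | succ f ihf =>
    rw [isEndNumberGo, has666]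
    by_cases h0 : n = 0
    · simp [h0]
    · have hm : PySem.Int.mod (n : Int) 1000 = ((n % 1000 : Nat) : Int) :=
        PySem.Int.mod_natCast n 1000
      have hd : PySem.Int.floordiv (n : Int) 10 = ((n / 10 : Nat) : Int) :=
        PySem.Int.floordiv_natCast n 10
      simp only [hm, hd]
      by_cases h666 : n % 1000 = 666
      · simp [h0, h666]
      · have : ¬ ((n % 1000 : Nat) : Int) = 666 := by exact_mod_cast h666
        simp only [h666, this, if_false, Int.natCast_eq_zero, h0]
        exact ihf (n / 10) (by omega)

-- Bridge: Nat.toDigits 10 (the core printer PySem.Int.toStr uses) is digs.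
theorem toDigitsCore_eq_digs (f n : Nat) (acc : List Char) (h : n < f) :
    Nat.toDigitsCore 10 f n acc = digs n ++ acc := by
  induction f generalizing n acc with
  | zero => omega
  | succ f ihf =>
    rw [Nat.toDigitsCore]
    by_cases hs : n < 10
    · have : n / 10 = 0 := by omega
      simp [this, digs_small hs, Nat.mod_eq_of_lt hs]
    · have h10 : 10 ≤ n := Nat.not_lt.mp hs
      have hne : ¬ n / 10 = 0 := by omega
      simp only [hne, if_false]
      rw [ihf (n / 10) _ (by omega), digs_big h10, List.append_assoc]
      simp

theorem toDigits_eq_digs (n : Nat) : Nat.toDigits 10 n = digs n := by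
  have := toDigitsCore_eq_digs (n + 1) n [] (by omega)
  simpa [Nat.toDigits] using this

-- ===== VERDICT (by name: the statement is the Claim_ definition above) =====
theorem isEndNumber_spec : Claim_equal_isEndNumber := by
  intro i _ hpre
  unfold Spec_isEndNumber
  obtain ⟨n, rfl⟩ := Int.eq_ofNat_of_zero_le hpre
  unfold isEndNumber isEndNumber_alt
  rw [Bool.eq_iff_iff, PySem.Str.isIn_iff_infix, PySem.Int.toList_toStr]
  have hchars : PySem.Int.toChars (n : Int) = digs n := by
    simp only [PySem.Int.toChars]
    rw [if_neg (by omega)]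
    simpa using toDigits_eq_digs n
  rw [hchars]
  have hfuel : isEndNumberGo ((n : Int).natAbs + 1) (n : Int) = has666 n :=
    isEndNumberGo_eq_has666 _ n (by simp)
  rw [hfuel, has666_iff_infix n,
    show ("666" : String).toList = ['6', '6', '6'] from by decide]
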